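-- pv_equiv track=rewrite | github.com/shravanbhavsar/scythe-lab4 | run_tool/experiments_common.py | mk_k_holes
-- ===== SOURCE A (Python) =====
-- def mk_k_holes(holes, k):
--     if isinstance(holes, dict):
--         holes = list(holes.keys())
--     if len(holes) < k:
--         return []
--     argss = [holes[i:] for i in range(k)]
--     zs = zip(*argss)
--     return list(zs)
-- ===== SOURCE B (Python) =====
-- def mk_k_holes(holes, k):
--     if isinstance(holes, dict):
--         holes = list(holes.keys())
--     if k < 1 or len(holes) < k:
--         return []
--     return [tuple(holes[i:i + k]) for i in range(len(holes) - k + 1)]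
-- ===== Notes on version B (the rewrite author's own statement) =====
-- stated objective: simpler
-- what changed: Instead of building k shifted copies of the list and zipping them columnwise, B slices each size-k window directly at every start index, with an explicit k < 1 window-size guard replacing zip()'s implicit empty result.
import Mathlib
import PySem

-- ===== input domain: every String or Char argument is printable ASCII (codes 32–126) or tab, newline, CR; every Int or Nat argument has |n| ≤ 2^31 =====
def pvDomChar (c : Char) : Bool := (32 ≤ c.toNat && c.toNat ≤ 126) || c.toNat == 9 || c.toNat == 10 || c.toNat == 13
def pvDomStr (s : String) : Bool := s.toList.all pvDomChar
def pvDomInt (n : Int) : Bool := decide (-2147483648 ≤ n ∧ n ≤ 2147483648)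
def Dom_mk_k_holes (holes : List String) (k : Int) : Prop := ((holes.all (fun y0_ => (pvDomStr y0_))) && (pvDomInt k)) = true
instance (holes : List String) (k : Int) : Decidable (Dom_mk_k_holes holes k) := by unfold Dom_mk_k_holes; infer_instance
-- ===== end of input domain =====

-- B replaces A's "build k shifted column lists and zip them" with a direct per-window
-- slice over start indices (same output, different decomposition; no speed claim).

-- ===== PORT A =====
-- zip(*argss): heads of all lists, stepping until some list is exhausted; zip() of no lists is [].
def pvHeads? : List (List String) → Option (List String)
  | [] => some []
  | l :: ls =>
    match l.head? with
    | none => none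
    | some h =>
      match pvHeads? ls with
      | none => none
      | some t => some (h :: t)

def pvZipGo : Nat → List (List String) → List (List String)
  | 0, _ => []
  | n + 1, ls =>
    match pvHeads? ls with
    | none => []
    | some hs => hs :: pvZipGo n (ls.map List.tail)

def pvZip (ls : List (List String)) : List (List String) :=
  match ls with
  | [] => []
  | l :: _ => pvZipGo l.length ls

def mk_k_holes (holes : List String) (k : Int) : List (List String) :=
  if (holes.length : Int) < k then []
  else
    pvZip ((PySem.List.pyRange 0 k 1).map (fun i => PySem.List.slice holes (some i) none))

-- ===== PORT B =====
def mk_k_holes_alt (holes : List String) (k : Int) : List (List String) :=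
  if k < 1 then []
  else if (holes.length : Int) < k then []
  else (List.range (holes.length - k.toNat + 1)).map (fun i => (holes.drop i).take k.toNat)

-- ===== PRECONDITION & SPEC =====
def Spec_mk_k_holes (holes : List String) (k : Int) (out : List (List String)) : Prop := out = mk_k_holes_alt holes k
instance (holes : List String) (k : Int) (out : List (List String)) : Decidable (Spec_mk_k_holes holes k out) := by unfold Spec_mk_k_holes; infer_instance

-- ===== CLAIM (what is proved, stated in full; the proofs are below) =====
def Claim_equal_mk_k_holes : Prop := ∀ (holes : List String) (k : Int), Dom_mk_k_holes holes k → Spec_mk_k_holes holes k (mk_k_holes holes k)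

-- ===== LEMMAS AND PROOFS =====

-- A's argss list [holes[i:] for i in range(k)], as shifted drops.
theorem argss_eq (holes : List String) (k : Int) :
    (PySem.List.pyRange 0 k 1).map (fun i => PySem.List.slice holes (some i) none)
      = (List.range k.toNat).map (fun j => holes.drop j) := by
  rw [PySem.List.pyRange_one]
  simp [List.map_map, Function.comp_def, PySem.List.slice_from_natCast]

theorem heads_shift : ∀ (k : Nat) (hs : List String), k ≤ hs.length →
    pvHeads? ((List.range k).map (fun i => hs.drop i)) = some (hs.take k) := by
  intro k
  induction k with
  | zero => intro hs _; simp [pvHeads?]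
  | succ n ih =>
    intro hs hle
    cases hs with
    | nil => simp at hle
    | cons a t =>
      rw [List.range_succ_eq_map]
      simp only [List.map_cons, List.map_map, Function.comp_def, List.drop_zero,
        List.drop_succ_cons]
      have := ih t (by simpa using hle)
      simp [pvHeads?, this]

theorem heads_none : ∀ (ls : List (List String)), [] ∈ ls → pvHeads? ls = none := by
  intro ls hmem
  induction ls with
  | nil => simp at hmem
  | cons l ls ih =>
    rcases List.mem_cons.1 hmem with h | h
    · subst h; simp [pvHeads?]
    · cases hl : l.head? with
      | none => simp [pvHeads?, hl]
      | some h' => simp [pvHeads?, hl, ih h]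

theorem heads_shift_none (k : Nat) (hs : List String) (hk : 1 ≤ k) (hlen : hs.length < k) :
    pvHeads? ((List.range k).map (fun i => hs.drop i)) = none := by
  apply heads_none
  refine List.mem_map.2 ⟨k - 1, List.mem_range.2 (by omega), ?_⟩
  exact List.drop_eq_nil_of_le (by omega)

theorem tails_shift (k : Nat) (hs : List String) :
    (((List.range k).map (fun i => hs.drop i)).map List.tail)
      = (List.range k).map (fun i => hs.tail.drop i) := by
  simp only [List.map_map, Function.comp_def]
  apply List.map_congr_left
  intro i _
  rw [List.tail_drop, List.drop_tail]

theorem pvZip_cons (l : List String) (ls : List (List String)) :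
    pvZip (l :: ls) = pvZipGo l.length (l :: ls) := rfl

theorem zipGo_shift : ∀ (hs : List String) (k : Nat), 1 ≤ k → k ≤ hs.length →
    pvZipGo hs.length ((List.range k).map (fun i => hs.drop i))
      = (List.range (hs.length - k + 1)).map (fun i => (hs.drop i).take k) := by
  intro hs
  induction hs with
  | nil => intro k h1 h2; simp at h2; omega
  | cons a t ih =>
    intro k h1 h2
    simp only [List.length_cons] at h2 ⊢
    rw [pvZipGo, heads_shift k (a :: t) (by simpa using h2), tails_shift]
    simp only [List.tail_cons]
    by_cases hkt : k ≤ t.length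
    · rw [ih k h1 hkt]
      have heq : t.length + 1 - k + 1 = (t.length - k + 1) + 1 := by omega
      conv_rhs => rw [heq, List.range_succ_eq_map]
      simp [List.map_map, Function.comp_def]
    · have hkeq : k = t.length + 1 := by omega
      have hz : pvZipGo t.length ((List.range k).map (fun i => t.drop i)) = [] := by
        cases ht : t.length with
        | zero => rw [pvZipGo]
        | succ m =>
          rw [pvZipGo, heads_shift_none k t h1 (by omega)]
      rw [hz]
      have : t.length + 1 - k + 1 = 1 := by omega
      rw [this]
      simp

-- ===== VERDICT (by name: the statement is the Claim_ definition above) =====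
theorem mk_k_holes_spec : Claim_equal_mk_k_holes := by
  intro holes k _
  unfold Spec_mk_k_holes mk_k_holes mk_k_holes_alt
  by_cases hk1 : k < 1
  · by_cases hlt : (holes.length : Int) < k
    · simp [hlt, hk1]
    · have hk0 : k.toNat = 0 := by omega
      simp [hlt, hk1, argss_eq, hk0, pvZip]
  · by_cases hlt : (holes.length : Int) < k
    · simp [hlt, hk1]
    · have hk : 1 ≤ k.toNat := by omega
      have hlen : k.toNat ≤ holes.length := by omega
      rw [if_neg hlt, if_neg hk1, if_neg hlt, argss_eq]
      obtain ⟨m, hm⟩ : ∃ m, k.toNat = m + 1 := ⟨k.toNat - 1, by omega⟩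
      have hcons : (List.range k.toNat).map (fun j => holes.drop j)
          = holes :: (List.range m).map (fun j => holes.tail.drop j) := by
        rw [hm, List.range_succ_eq_map]
        simp [List.map_map, Function.comp_def, List.drop_tail]
      rw [hcons, pvZip_cons, ← hcons]
      exact zipGo_shift holes k.toNat hk hlen
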